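-- pv_equiv track=rewrite | github.com/dannyl11/NBA-LogReg-Betting-Model | nba_moneyline_model.py | isValidOdds
-- ===== SOURCE A (Python) =====
-- def isValidOdds(odds):
--     if '+' not in odds and '-' not in odds:
--         return False
--     elif '+' in odds and '-' in odds:
--         return False
--     for c in odds[1:]:
--         if c.isdigit() == False:
--             return False
--     return True
-- ===== SOURCE B (Python) =====
-- def isValidOdds(odds):
--     return len(odds) > 0 and odds[0] in '+-' and all(c.isdigit() for c in odds[1:])
-- ===== Notes on version B (the rewrite author's own statement) =====
-- stated objective: simpler
-- what changed: Replaces A's two whole-string sign-membership scans plus an early-return digit loop by a single positional boolean: first character is '+' or '-' and the rest are digits.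
import Mathlib
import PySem

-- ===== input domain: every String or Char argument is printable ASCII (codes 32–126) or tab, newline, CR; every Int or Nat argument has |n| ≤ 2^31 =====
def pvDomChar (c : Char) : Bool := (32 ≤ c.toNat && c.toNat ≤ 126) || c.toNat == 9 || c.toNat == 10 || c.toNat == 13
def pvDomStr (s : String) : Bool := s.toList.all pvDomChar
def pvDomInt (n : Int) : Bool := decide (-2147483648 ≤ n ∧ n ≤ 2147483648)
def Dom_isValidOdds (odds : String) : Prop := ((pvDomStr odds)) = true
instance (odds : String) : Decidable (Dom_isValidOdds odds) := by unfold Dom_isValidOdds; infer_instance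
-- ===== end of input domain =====

-- B: single positional boolean (first char is a sign, rest digits) instead of A's whole-string membership guards + early-return loop; simpler, same cost.
-- ===== PORT A =====
-- the for-loop over odds[1:] with early return False
def pvLoopA (cs : List Char) : Bool :=
  match cs with
  | [] => true
  | c :: rest => if (PySem.Chars.isdigit c == false) then false else pvLoopA rest

def isValidOdds (odds : String) : Bool :=
  let s := odds.toList
  if ¬ (PySem.Chars.isIn ['+'] s) ∧ ¬ (PySem.Chars.isIn ['-'] s) then false
  else if PySem.Chars.isIn ['+'] s ∧ PySem.Chars.isIn ['-'] s then false
  else pvLoopA (PySem.List.slice s (some 1) none)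

-- ===== PORT B =====
def isValidOdds_alt (odds : String) : Bool :=
  match odds.toList with
  | [] => false                                   -- len(odds) > 0 fails
  | c :: rest => PySem.Chars.isIn [c] ['+', '-'] && rest.all PySem.Chars.isdigit

-- ===== PRECONDITION & SPEC =====
def Spec_isValidOdds (odds : String) (out : Bool) : Prop := out = isValidOdds_alt odds
instance (odds : String) (out : Bool) : Decidable (Spec_isValidOdds odds out) := by unfold Spec_isValidOdds; infer_instance

-- ===== CLAIM (what is proved, stated in full; the proofs are below) =====
def Claim_equal_isValidOdds : Prop := ∀ (odds : String), Dom_isValidOdds odds → Spec_isValidOdds odds (isValidOdds odds)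

-- ===== LEMMAS AND PROOFS =====

-- ===== VERDICT (by name: the statement is the Claim_ definition above) =====
-- A's digit loop is List.all
theorem pvLoopA_eq_all (cs : List Char) : pvLoopA cs = cs.all PySem.Chars.isdigit := by
  induction cs with
  | nil => rfl
  | cons c rest ih =>
      simp only [pvLoopA, List.all_cons, ih]
      by_cases h : PySem.Chars.isdigit c = true <;> simp [h]

-- singleton 'ch in s' is membership
theorem pvIsIn_singleton (ch : Char) (s : List Char) :
    PySem.Chars.isIn [ch] s = true ↔ ch ∈ s := by
  rw [PySem.Chars.isIn_iff_infix]
  constructor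
  · intro h; exact h.mem (by simp)
  · intro h
    obtain ⟨pre, suf, rfl⟩ := List.mem_iff_append.mp h
    exact ⟨pre, suf, by simp⟩

-- a digit character is not a sign character
theorem pvDigit_ne_sign (c : Char) (h : PySem.Chars.isdigit c = true) :
    c ≠ '+' ∧ c ≠ '-' := by
  constructor <;> rintro rfl <;> simp [PySem.Chars.isdigit] at h

theorem isValidOdds_spec : Claim_equal_isValidOdds := by
  intro odds _
  unfold Spec_isValidOdds isValidOdds isValidOdds_alt
  cases hs : odds.toList with
  | nil => decide
  | cons c rest =>
      simp only [PySem.List.slice_from_one, List.tail_cons, pvLoopA_eq_all]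
      by_cases hall : rest.all PySem.Chars.isdigit = true
      · have hp : '+' ∉ rest := fun h =>
          (pvDigit_ne_sign _ (List.all_eq_true.mp hall _ h)).1 rfl
        have hm : '-' ∉ rest := fun h =>
          (pvDigit_ne_sign _ (List.all_eq_true.mp hall _ h)).2 rfl
        have e1 : PySem.Chars.isIn ['+'] (c :: rest) = decide (c = '+') := by
          rw [Bool.eq_iff_iff, pvIsIn_singleton]; simp [List.mem_cons, hp, eq_comm]
        have e2 : PySem.Chars.isIn ['-'] (c :: rest) = decide (c = '-') := by
          rw [Bool.eq_iff_iff, pvIsIn_singleton]; simp [List.mem_cons, hm, eq_comm]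
        have e3 : PySem.Chars.isIn [c] ['+', '-'] = (decide (c = '+') || decide (c = '-')) := by
          rw [Bool.eq_iff_iff, pvIsIn_singleton]; simp [List.mem_cons]
        simp only [e1, e2, e3, hall]
        by_cases h1 : c = '+' <;> by_cases h2 : c = '-' <;> simp [h1, h2]
      · have e3 : (PySem.Chars.isIn [c] ['+', '-'] && rest.all PySem.Chars.isdigit) = false := by
          simp [Bool.eq_false_iff.mpr hall]
        rw [e3]
        split_ifs with h1 h2
        · rfl
        · rfl
        · exact Bool.eq_false_iff.mpr hall
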